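-- pv_equiv track=rewrite | github.com/jahongir1511/8.4dars | 8.4dars/main.py | repeat_sum
-- ===== SOURCE A (Python) =====
-- from collections import defaultdict
--
-- def repeat_sum(list_of_lists):
--     count = defaultdict(int)
--
--     for sublist in list_of_lists:
--         unique_numbers = set(sublist)
--         for num in unique_numbers:
--             count[num] += 1
--
--     result = sum(num for num, cnt in count.items() if cnt >= 2)
--     return result
-- ===== SOURCE B (Python) =====
-- def repeat_sum(list_of_lists):
--     seen_once = set()
--     seen_multiple = set()
--     total = 0
--     for sublist in list_of_lists:
--         for num in set(sublist):
--             if num in seen_once: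
--                 seen_once.remove(num)
--                 seen_multiple.add(num)
--                 total += num
--             elif num not in seen_multiple:
--                 seen_once.add(num)
--     return total
-- ===== Notes on version B (the rewrite author's own statement) =====
-- stated objective: alternative
-- what changed: Replaces the frequency dict and the final count.items() filter pass with two sets (seen_once/seen_multiple) and a running total that adds each value exactly once, at the moment it is seen in a second sublist.
import Mathlib
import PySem

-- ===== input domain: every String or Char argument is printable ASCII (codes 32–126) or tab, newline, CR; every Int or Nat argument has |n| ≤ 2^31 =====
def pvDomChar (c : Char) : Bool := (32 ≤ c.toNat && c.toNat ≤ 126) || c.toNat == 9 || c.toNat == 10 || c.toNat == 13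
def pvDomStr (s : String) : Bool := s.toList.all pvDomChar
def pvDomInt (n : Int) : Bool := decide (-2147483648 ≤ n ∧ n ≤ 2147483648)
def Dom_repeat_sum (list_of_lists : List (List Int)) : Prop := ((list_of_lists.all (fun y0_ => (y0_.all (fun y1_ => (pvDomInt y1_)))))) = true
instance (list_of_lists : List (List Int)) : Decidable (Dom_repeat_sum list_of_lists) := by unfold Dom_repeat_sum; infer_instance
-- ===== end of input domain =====

-- B replaces A's frequency dict + final filter pass with two sets (seen once / seen in ≥2 sublists)
-- and a running total updated the moment a value is seen in a second sublist (alternative decomposition).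


-- ===== PORT A =====
-- count[num] += 1 on a defaultdict(int) is Dict.modify num 0 (· + 1); set(sublist) is PySem.Set.ofList;
-- the dict built by the loops is only summed over afterwards (order cannot matter), so iterating each
-- set in first-occurrence order is exact.
def aCount (list_of_lists : List (List Int)) : PySem.Dict Int Int :=
  list_of_lists.foldl
    (fun count sublist =>
      (PySem.Set.ofList sublist).foldl (fun count num => count.modify num 0 (· + 1)) count)
    PySem.Dict.empty

def repeat_sum (list_of_lists : List (List Int)) : Int :=
  ((((aCount list_of_lists).items.filter (fun p => decide (2 ≤ p.2))).map (·.1)).sum)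

-- ===== PORT B =====
-- B's state: (seen_once, seen_multiple, total). set.remove is guarded by the membership test, so Set.discard is exact here.
def bStep (st : PySem.Set Int × PySem.Set Int × Int) (num : Int) :
    PySem.Set Int × PySem.Set Int × Int :=
  if PySem.Set.contains st.1 num then
    (PySem.Set.discard st.1 num, PySem.Set.add st.2.1 num, st.2.2 + num)
  else if PySem.Set.contains st.2.1 num then st
  else (PySem.Set.add st.1 num, st.2.1, st.2.2)

def bFold (list_of_lists : List (List Int)) : PySem.Set Int × PySem.Set Int × Int :=
  list_of_lists.foldl
    (fun st sublist => (PySem.Set.ofList sublist).foldl bStep st)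
    (PySem.Set.empty, PySem.Set.empty, 0)

def repeat_sum_alt (list_of_lists : List (List Int)) : Int :=
  (bFold list_of_lists).2.2

-- ===== PRECONDITION & SPEC =====
def Spec_repeat_sum (list_of_lists : List (List Int)) (out : Int) : Prop := out = repeat_sum_alt list_of_lists
instance (list_of_lists : List (List Int)) (out : Int) : Decidable (Spec_repeat_sum list_of_lists out) := by unfold Spec_repeat_sum; infer_instance

-- ===== CLAIM (what is proved, stated in full; the proofs are below) =====
def Claim_equal_repeat_sum : Prop := ∀ (list_of_lists : List (List Int)), Dom_repeat_sum list_of_lists → Spec_repeat_sum list_of_lists (repeat_sum list_of_lists)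

-- ===== LEMMAS AND PROOFS =====

-- The coupling invariant between A's count dict and B's (seen_once, seen_multiple, total) state.
def CountInv (d : PySem.Dict Int Int) (st : PySem.Set Int × PySem.Set Int × Int) : Prop :=
  d.keys.Nodup ∧
  (∀ x ∈ d.keys, 1 ≤ d.getD x 0) ∧
  (∀ x : Int, x ∈ st.1 ↔ d.getD x 0 = 1) ∧
  (∀ x : Int, x ∈ st.2.1 ↔ 2 ≤ d.getD x 0) ∧
  st.2.2 = (d.keys.filter (fun k => decide (2 ≤ d.getD k 0))).sum

-- sum of a filtered Nodup list when the predicate is flipped on at exactly one element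
theorem sum_filter_flip {l : List Int} (hl : l.Nodup) {p q : Int → Bool} {a : Int}
    (ha : a ∈ l) (hpa : p a = false) (hqa : q a = true)
    (hother : ∀ x ∈ l, x ≠ a → p x = q x) :
    (l.filter q).sum = (l.filter p).sum + a := by
  induction l with
  | nil => cases ha
  | cons b l ih =>
    rcases List.nodup_cons.mp hl with ⟨hb, hl'⟩
    rcases List.mem_cons.mp ha with rfl | hal
    · have hp : ∀ x ∈ l, p x = q x := fun x hx => hother x (List.mem_cons_of_mem _ hx) (fun h => hb (h ▸ hx))
      simp [hpa, hqa, List.filter_congr hp]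
      ring
    · have hba : b ≠ a := fun h => hb (h ▸ hal)
      have := ih hl' hal (fun x hx hxa => hother x (List.mem_cons_of_mem _ hx) hxa)
      rcases h : p b with _ | _ <;>
        simp_all [(hother b (List.mem_cons_self) hba).symm.trans h] <;> ring

theorem inv_step (d : PySem.Dict Int Int) (st : PySem.Set Int × PySem.Set Int × Int)
    (num : Int) (h : CountInv d st) : CountInv (d.modify num 0 (· + 1)) (bStep st num) := by
  obtain ⟨hnd, hpos, honce, hmult, htot⟩ := h
  unfold CountInv
  have hget : ∀ x : Int, (d.modify num 0 (· + 1)).getD x 0 =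
      if x = num then d.getD num 0 + 1 else d.getD x 0 :=
    fun x => PySem.Dict.getD_modify d num x 0 _
  rcases hc : d.contains num with _ | _
  · -- first sublist containing num
    have h0 : d.getD num 0 = 0 := PySem.Dict.getD_of_not_contains d 0 hc
    have hnk : num ∉ d.keys := fun h =>
      by rw [(PySem.Dict.contains_iff_mem_keys d num).mpr h] at hc; cases hc
    have hkeys : (d.modify num 0 (· + 1)).keys = d.keys ++ [num] := by
      rw [PySem.Dict.keys_modify]
      exact PySem.Dict.keys_insert_of_not_contains _ _ hc
    have hno : PySem.Set.contains st.1 num = false := by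
      rcases h' : PySem.Set.contains st.1 num with _ | _
      · rfl
      · exact absurd ((honce num).mp (PySem.Set.contains_iff _ _ |>.mp h')) (by omega)
    have hno2 : PySem.Set.contains st.2.1 num = false := by
      rcases h' : PySem.Set.contains st.2.1 num with _ | _
      · rfl
      · exact absurd ((hmult num).mp (PySem.Set.contains_iff _ _ |>.mp h')) (by omega)
    unfold bStep; rw [hno, hno2]
    simp only [Bool.false_eq_true, if_false]
    rw [hkeys]
    refine ⟨?_, ?_, ?_, ?_, ?_⟩
    · exact List.Nodup.append hnd (List.nodup_singleton num)
        (by intro a ha hb; simp at hb; exact hnk (hb ▸ ha))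
    · intro x hx; rw [hget x]
      rcases List.mem_append.mp hx with h | h
      · rw [if_neg (fun he : x = num => hnk (he ▸ h))]; exact hpos x h
      · simp at h; subst h; rw [if_pos rfl]; omega
    · intro x
      simp only [PySem.Set.mem_add, honce x, hget x]
      by_cases hxe : x = num
      · subst hxe; simp [h0]
      · simp [hxe]
    · intro x
      simp only [hmult x, hget x]
      by_cases hxe : x = num
      · subst hxe; simp [h0]
      · simp [hxe]
    · rw [List.filter_append, htot]
      have he : List.filter (fun k => decide (2 ≤ (d.modify num 0 (· + 1)).getD k 0)) [num] = [] := by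
        simp [hget num, h0]
      rw [he, List.append_nil]
      exact congrArg List.sum (List.filter_congr (fun x hx => by
        rw [hget x, if_neg (fun h : x = num => hnk (h ▸ hx))]))
  · -- num already counted: its old count c ≥ 1
    have hmemk : num ∈ d.keys := (PySem.Dict.contains_iff_mem_keys d num).mp hc
    have hc1 : 1 ≤ d.getD num 0 := hpos num hmemk
    have hkeys : (d.modify num 0 (· + 1)).keys = d.keys := by
      rw [PySem.Dict.keys_modify]
      exact PySem.Dict.keys_insert_of_contains _ _ hc
    rw [hkeys]
    by_cases h1 : d.getD num 0 = 1
    · -- second sublist containing num: B promotes it and adds it to the total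
      have hin : PySem.Set.contains st.1 num = true := by
        rw [PySem.Set.contains_iff]; exact (honce num).mpr h1
      unfold bStep; rw [hin]; simp only [if_true]
      refine ⟨hnd, ?_, ?_, ?_, ?_⟩
      · intro x hx; rw [hget x]; split_ifs with hxe
        · omega
        · exact hpos x hx
      · intro x
        simp only [PySem.Set.mem_discard, honce x, hget x]
        by_cases hxe : x = num
        · subst hxe; simp [h1]
        · simp [hxe]
      · intro x
        simp only [PySem.Set.mem_add, hmult x, hget x]
        by_cases hxe : x = num
        · subst hxe; simp [h1]
        · simp [hxe]
      · rw [htot]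
        exact (sum_filter_flip hnd hmemk (by simp [h1])
          (by rw [hget num, if_pos rfl]; simp; omega)
          (fun x hx hxn => by rw [hget x, if_neg hxn])).symm
    · -- third or later sublist: count ≥ 2 already, B does nothing
      have h2 : 2 ≤ d.getD num 0 := by omega
      have hno : PySem.Set.contains st.1 num = false := by
        rcases h' : PySem.Set.contains st.1 num with _ | _
        · rfl
        · exact absurd ((honce num).mp (PySem.Set.contains_iff _ _ |>.mp h')) (by omega)
      have hyes : PySem.Set.contains st.2.1 num = true := by
        rw [PySem.Set.contains_iff]; exact (hmult num).mpr h2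
      unfold bStep; rw [hno, hyes]
      simp only [Bool.false_eq_true, if_false, if_true]
      refine ⟨hnd, ?_, ?_, ?_, ?_⟩
      · intro x hx; rw [hget x]; split_ifs with hxe
        · omega
        · exact hpos x hx
      · intro x; rw [honce x, hget x]; split_ifs with hxe
        · subst hxe; omega
        · exact Iff.rfl
      · intro x; rw [hmult x, hget x]; split_ifs with hxe
        · subst hxe; omega
        · exact Iff.rfl
      · rw [htot]
        exact congrArg List.sum (List.filter_congr (fun x hx => by
          rw [hget x]; split_ifs with hxe
          · subst hxe; simp; omega
          · rfl))

theorem inv_foldl (l : List Int) (d : PySem.Dict Int Int)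
    (st : PySem.Set Int × PySem.Set Int × Int) (h : CountInv d st) :
    CountInv (l.foldl (fun d num => d.modify num 0 (· + 1)) d) (l.foldl bStep st) := by
  induction l generalizing d st with
  | nil => exact h
  | cons a l ih => exact ih _ _ (inv_step d st a h)

theorem inv_fold (ls : List (List Int)) : CountInv (aCount ls) (bFold ls) := by
  have h0 : CountInv PySem.Dict.empty (PySem.Set.empty, PySem.Set.empty, 0) := by
    refine ⟨PySem.Dict.nodup_keys_empty, ?_, ?_, ?_, ?_⟩ <;>
      simp [PySem.Dict.keys_empty, PySem.Dict.getD_empty, PySem.Set.empty]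
  unfold aCount bFold
  induction ls using List.reverseRecOn with
  | nil => exact h0
  | append_singleton ls a ih =>
    rw [List.foldl_append, List.foldl_append]
    exact inv_foldl _ _ _ ih

-- ===== VERDICT (by name: the statement is the Claim_ definition above) =====
theorem repeat_sum_spec : Claim_equal_repeat_sum := by
  intro ls _
  unfold Spec_repeat_sum repeat_sum repeat_sum_alt
  obtain ⟨hnd, _, _, _, htot⟩ := inv_fold ls
  rw [PySem.Dict.items_eq_map_keys _ hnd 0, List.filter_map, List.map_map, htot]
  simp [Function.comp_def]
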